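-- pv_equiv track=rewrite | github.com/zuleicasobral475-cmd/v85 | src/services/unified_search_manager.py | _remove_duplicates_and_rank
-- ===== SOURCE A (Python) =====
-- from typing import Dict, List, Optional, Any
--
-- def _remove_duplicates_and_rank(results: List[Dict]) -> List[Dict]:
--     """Remove duplicatas e ranqueia por qualidade"""
--     seen_urls = set()
--     unique_results = []
--
--     # Prioridade: 1) Exa, 2) WebSailor, 3) Google, 4) Serper, 5) Social
--     priority_order = ['exa', 'websailor', 'google', 'serper', 'youtube', 'twitter', 'linkedin', 'instagram']
--
--     # Ordena por prioridade da fonte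
--     sorted_results = sorted(results, key=lambda x: priority_order.index(x.get('source', 'unknown')) if x.get('source') in priority_order else 999)
--
--     for result in sorted_results:
--         url = result.get('url', '')
--         if url and url not in seen_urls:
--             seen_urls.add(url)
--             unique_results.append(result)
--
--     return unique_results
-- ===== SOURCE B (Python) =====
-- def _remove_duplicates_and_rank(results):
--     """Remove duplicatas e ranqueia por qualidade (bucket grouping instead of sorting)."""
--     priority_order = ['exa', 'websailor', 'google', 'serper', 'youtube', 'twitter', 'linkedin', 'instagram']
--
--     def bucket_index(r):
--         src = r.get('source')
--         for i, name in enumerate(priority_order):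
--             if name == src:
--                 return i
--         return len(priority_order)
--
--     # Group into priority buckets (unknown sources last), preserving input order within each bucket.
--     ordered = [r for i in range(len(priority_order) + 1)
--                  for r in results if bucket_index(r) == i]
--
--     seen_urls = set()
--     unique_results = []
--     for result in ordered:
--         url = result.get('url', '')
--         if url and url not in seen_urls:
--             seen_urls.add(url)
--             unique_results.append(result)
--     return unique_results
-- ===== Notes on version B (the rewrite author's own statement) =====
-- stated objective: alternative
-- what changed: Replaces the comparison sort with a bucket grouping: each result is assigned a bucket index by scanning the fixed priority list (unknown sources go to a trailing bucket) and the output order is the concatenation of the buckets in priority order, preserving input order within each bucket; the first-seen nonempty-url dedup pass is unchanged.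
import Mathlib
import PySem

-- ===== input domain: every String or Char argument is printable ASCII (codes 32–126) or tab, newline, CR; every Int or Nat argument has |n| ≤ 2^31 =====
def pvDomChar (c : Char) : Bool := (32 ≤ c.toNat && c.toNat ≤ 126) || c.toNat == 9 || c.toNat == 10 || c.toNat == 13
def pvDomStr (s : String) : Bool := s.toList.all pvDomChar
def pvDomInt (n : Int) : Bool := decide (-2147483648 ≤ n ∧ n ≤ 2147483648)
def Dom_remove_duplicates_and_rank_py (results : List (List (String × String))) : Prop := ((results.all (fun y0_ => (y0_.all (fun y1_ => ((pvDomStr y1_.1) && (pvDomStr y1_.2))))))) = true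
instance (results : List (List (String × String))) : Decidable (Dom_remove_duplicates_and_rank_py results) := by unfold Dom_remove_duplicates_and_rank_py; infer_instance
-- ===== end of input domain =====

-- B replaces A's comparison sort by a bucket grouping over the fixed priority list (alternative
-- decomposition, same dedup pass); equivalence of the return values is proved for all inputs.

-- ===== PORT A =====
def priorityOrderA : List String :=
  ["exa", "websailor", "google", "serper", "youtube", "twitter", "linkedin", "instagram"]

-- sort key: priority_order.index(x.get('source', 'unknown')) if x.get('source') in priority_order else 999
def keyA (x : List (String × String)) : Int :=
  if (match PySem.Dict.get? ⟨x⟩ "source" with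
      | some s => priorityOrderA.contains s
      | none => false) = true then
    (((PySem.List.index? priorityOrderA (PySem.Dict.getD ⟨x⟩ "source" "unknown")).getD 999 : Nat) : Int)
  else 999

def remove_duplicates_and_rank_py (results : List (List (String × String))) : List (List (String × String)) :=
  let sorted_results := PySem.List.sorted results keyA
  (sorted_results.foldl
    (fun (st : PySem.Set String × List (List (String × String))) result =>
      let url := PySem.Dict.getD ⟨result⟩ "url" ""
      if url != "" && !(st.1.contains url) then (st.1.add url, st.2 ++ [result]) else st)
    (PySem.Set.empty, [])).2

-- ===== PORT B =====
-- bucket_index: scan priority_order for r.get('source'); len(priority_order) if absent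
def bucketIdx (ps : List String) (src : Option String) : Int :=
  match ps with
  | [] => 0
  | p :: rest => if (some p == src) = true then 0 else 1 + bucketIdx rest src

def rankB (x : List (String × String)) : Int :=
  bucketIdx priorityOrderA (PySem.Dict.get? ⟨x⟩ "source")

def remove_duplicates_and_rank_py_alt (results : List (List (String × String))) : List (List (String × String)) :=
  let ordered := (PySem.List.pyRange 0 ((priorityOrderA.length : Int) + 1)).flatMap
    (fun i => results.filter (fun r => rankB r == i))
  (ordered.foldl
    (fun (st : PySem.Set String × List (List (String × String))) result =>
      let url := PySem.Dict.getD ⟨result⟩ "url" ""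
      if url != "" && !(st.1.contains url) then (st.1.add url, st.2 ++ [result]) else st)
    (PySem.Set.empty, [])).2

-- ===== PRECONDITION & SPEC =====
def Spec_remove_duplicates_and_rank_py (results : List (List (String × String))) (out : List (List (String × String))) : Prop := out = remove_duplicates_and_rank_py_alt results
instance (results : List (List (String × String))) (out : List (List (String × String))) : Decidable (Spec_remove_duplicates_and_rank_py results out) := by unfold Spec_remove_duplicates_and_rank_py; infer_instance

-- ===== CLAIM (what is proved, stated in full; the proofs are below) =====
def Claim_equal_remove_duplicates_and_rank_py : Prop := ∀ (results : List (List (String × String))), Dom_remove_duplicates_and_rank_py results → Spec_remove_duplicates_and_rank_py results (remove_duplicates_and_rank_py results)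

-- ===== LEMMAS AND PROOFS =====

-- insertBy passes over a prefix with no 'before' hit
theorem insertBy_append_not_before {α : Type} (before : α → α → Bool) (x : α)
    (as bs : List α) (h : ∀ a ∈ as, before x a = false) :
    PySem.List.insertBy before x (as ++ bs) = as ++ PySem.List.insertBy before x bs := by
  induction as with
  | nil => simp
  | cons a as ih =>
    have ha : before x a = false := h a (by simp)
    simp [PySem.List.insertBy, ha, ih (fun a ha' => h a (by simp [ha']))]

-- insertBy puts x in front when everything is 'after' x
theorem insertBy_all_before {α : Type} (before : α → α → Bool) (x : α)
    (bs : List α) (h : ∀ y ∈ bs, before x y = true) :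
    PySem.List.insertBy before x bs = x :: bs := by
  cases bs with
  | nil => rfl
  | cons y ys => simp [PySem.List.insertBy, h y (by simp)]

-- inserting x into the bucket concatenation of p appends x at the end of its bucket
theorem bucket_insert {α : Type} (rank : α → Int) (x : α) (rs : List Int) (p : List α)
    (hs : rs.Pairwise (· < ·)) (hx : rank x ∈ rs) :
    PySem.List.insertBy (fun a b => decide (rank a < rank b)) x
        (rs.flatMap (fun r => p.filter (fun a => rank a == r)))
      = rs.flatMap (fun r => (p ++ [x]).filter (fun a => rank a == r)) := by
  induction rs with
  | nil => simp at hx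
  | cons r rs' ih =>
    have hlt : ∀ r' ∈ rs', r < r' := (List.pairwise_cons.mp hs).1
    have hs' : rs'.Pairwise (· < ·) := (List.pairwise_cons.mp hs).2
    simp only [List.flatMap_cons]
    by_cases hk : rank x = r
    · have h1 : ∀ a ∈ p.filter (fun a => rank a == r), (decide (rank x < rank a)) = false := by
        intro a ha
        have : rank a = r := by simpa using (List.of_mem_filter ha)
        simp [this, hk]
      rw [insertBy_append_not_before _ _ _ _ h1]
      have h2 : ∀ y ∈ rs'.flatMap (fun r => p.filter (fun a => rank a == r)),
          (decide (rank x < rank y)) = true := by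
        intro y hy
        rcases List.mem_flatMap.mp hy with ⟨r', hr', hyf⟩
        have : rank y = r' := by simpa using (List.of_mem_filter hyf)
        have : r < rank y := this ▸ hlt r' hr'
        simp [hk]; omega
      rw [insertBy_all_before _ _ _ h2]
      have hbx : (p ++ [x]).filter (fun a => rank a == r) = p.filter (fun a => rank a == r) ++ [x] := by
        simp [List.filter_append, hk]
      have hrest : rs'.flatMap (fun r => (p ++ [x]).filter (fun a => rank a == r))
          = rs'.flatMap (fun r => p.filter (fun a => rank a == r)) := by
        unfold List.flatMap
        refine congrArg List.flatten (List.map_congr_left ?_)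
        intro r' hr'
        have : rank x ≠ r' := by have := hlt r' hr'; omega
        simp [List.filter_append, this]
      rw [hbx, hrest]; simp
    · have hx' : rank x ∈ rs' := by
        rcases List.mem_cons.mp hx with h | h
        · exact absurd h hk
        · exact h
      have hgt : r < rank x := hlt _ hx'
      have h1 : ∀ a ∈ p.filter (fun a => rank a == r), (decide (rank x < rank a)) = false := by
        intro a ha
        have : rank a = r := by simpa using (List.of_mem_filter ha)
        simp [this]; omega
      rw [insertBy_append_not_before _ _ _ _ h1, ih hs' hx']
      have : (p ++ [x]).filter (fun a => rank a == r) = p.filter (fun a => rank a == r) := by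
        simp [List.filter_append, hk]
      rw [this]

-- bucketIdx bounds
theorem bucketIdx_nonneg (ps : List String) (src : Option String) : 0 ≤ bucketIdx ps src := by
  induction ps with
  | nil => simp [bucketIdx]
  | cons p rest ih => by_cases h : (some p == src) = true <;> simp [bucketIdx, h] <;> omega

theorem bucketIdx_le (ps : List String) (src : Option String) : bucketIdx ps src ≤ ps.length := by
  induction ps with
  | nil => simp [bucketIdx]
  | cons p rest ih => by_cases h : (some p == src) = true <;> simp [bucketIdx, h] <;> omega

-- the bucket index of an absent source is the full length
theorem bucketIdx_not_mem (ps : List String) (s : String) (h : s ∉ ps) :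
    bucketIdx ps (some s) = ps.length := by
  induction ps with
  | nil => simp [bucketIdx]
  | cons p rest ih =>
    have hps : p ≠ s := fun he => h (by simp [he])
    have : (some p == some s) = false := by simpa using hps
    simp [bucketIdx, this, ih (fun hm => h (by simp [hm]))]
    omega

-- the bucket index of a present source is its first index
theorem bucketIdx_mem (ps : List String) (s : String) (h : s ∈ ps) :
    ∃ k : Nat, PySem.List.index? ps s = some k ∧ bucketIdx ps (some s) = (k : Int) ∧ (k : Int) < ps.length := by
  induction ps with
  | nil => simp at h
  | cons p rest ih =>
    by_cases hp : p = s
    · subst hp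
      refine ⟨0, PySem.List.index?_cons_self p rest, ?_, by simp⟩
      simp [bucketIdx]
    · have hm : s ∈ rest := by
        rcases List.mem_cons.mp h with h' | h'
        · exact absurd h'.symm hp
        · exact h'
      rcases ih hm with ⟨k, hk1, hk2, hk3⟩
      refine ⟨k + 1, ?_, ?_, ?_⟩
      · rw [PySem.List.index?_cons_of_ne rest hp, hk1]; rfl
      · have : (some p == some s) = false := by simpa using hp
        simp [bucketIdx, this, hk2]; push_cast; ring
      · simp; push_cast at hk3 ⊢; omega
    
-- A's sort key is a strictly monotone image of B's bucket index
theorem keyA_eq_rank (x : List (String × String)) :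
    keyA x = (if rankB x < 8 then rankB x else 999) := by
  unfold keyA rankB
  cases hs : PySem.Dict.get? ⟨x⟩ "source" with
  | none =>
    have : bucketIdx priorityOrderA none = 8 := by decide
    simp [this]
  | some s =>
    have hgetD : PySem.Dict.getD ⟨x⟩ "source" "unknown" = s := by
      simp [PySem.Dict.getD, hs]
    by_cases hm : s ∈ priorityOrderA
    · rcases bucketIdx_mem priorityOrderA s hm with ⟨k, hk1, hk2, hk3⟩
      have hc : priorityOrderA.contains s = true := by simpa [List.contains_iff_mem] using hm
      simp only [hc, hgetD, hk1, hk2]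
      have h8 : (priorityOrderA.length : Int) = 8 := by decide
      rw [h8] at hk3
      simp [hk3]
    · have hc : priorityOrderA.contains s = false := by simpa [List.contains_iff_mem] using hm
      have hb : bucketIdx priorityOrderA (some s) = 8 := by
        rw [bucketIdx_not_mem priorityOrderA s hm]; decide
      simp [hc, hb, hm]

-- the two comparison functions coincide
theorem before_eq (a b : List (String × String)) :
    (decide (keyA a < keyA b)) = (decide (rankB a < rankB b)) := by
  rw [keyA_eq_rank a, keyA_eq_rank b]
  have ha1 := bucketIdx_nonneg priorityOrderA (PySem.Dict.get? ⟨a⟩ "source")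
  have ha2 := bucketIdx_le priorityOrderA (PySem.Dict.get? ⟨a⟩ "source")
  have hb1 := bucketIdx_nonneg priorityOrderA (PySem.Dict.get? ⟨b⟩ "source")
  have hb2 := bucketIdx_le priorityOrderA (PySem.Dict.get? ⟨b⟩ "source")
  have hlen : (priorityOrderA.length : Int) = 8 := by decide
  rw [hlen] at ha2 hb2
  unfold rankB at *
  by_cases h1 : bucketIdx priorityOrderA (PySem.Dict.get? ⟨a⟩ "source") < 8 <;>
    by_cases h2 : bucketIdx priorityOrderA (PySem.Dict.get? ⟨b⟩ "source") < 8 <;>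
    simp [h1, h2] <;> omega

-- folding insertBy over xs extends the bucket concatenation of p
theorem foldl_insertBy_buckets (rs : List Int) (hs : rs.Pairwise (· < ·))
    (xs : List (List (String × String))) (hxs : ∀ x ∈ xs, rankB x ∈ rs) :
    ∀ p : List (List (String × String)),
      xs.foldl (fun acc x => PySem.List.insertBy (fun a b => decide (rankB a < rankB b)) x acc)
        (rs.flatMap (fun r => p.filter (fun a => rankB a == r)))
      = rs.flatMap (fun r => (p ++ xs).filter (fun a => rankB a == r)) := by
  induction xs with
  | nil => intro p; simp
  | cons x xs ih =>
    intro p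
    simp only [List.foldl_cons]
    rw [bucket_insert rankB x rs p hs (hxs x (by simp))]
    have := ih (fun y hy => hxs y (by simp [hy])) (p ++ [x])
    simpa using this

-- A's sorted list IS B's bucket concatenation
theorem sorted_eq_buckets (results : List (List (String × String))) :
    PySem.List.sorted results keyA
      = (PySem.List.pyRange 0 ((priorityOrderA.length : Int) + 1)).flatMap
          (fun i => results.filter (fun r => rankB r == i)) := by
  rw [PySem.List.sorted_eq_foldl_insertBy results keyA]
  have hfun : (fun (acc : List (List (String × String))) x =>
        PySem.List.insertBy (fun a b => decide (keyA a < keyA b)) x acc)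
      = (fun acc x => PySem.List.insertBy (fun a b => decide (rankB a < rankB b)) x acc) := by
    funext acc x
    congr 1
    funext a b
    exact before_eq a b
  rw [hfun]
  have hlen : (priorityOrderA.length : Int) + 1 = 9 := by decide
  rw [hlen]
  have hpair : (PySem.List.pyRange 0 9).Pairwise (· < ·) := PySem.List.pairwise_lt_pyRange_one 0 9
  have hmem : ∀ x ∈ results, rankB x ∈ PySem.List.pyRange 0 9 := by
    intro x _
    rw [PySem.List.mem_pyRange_one]
    have h1 := bucketIdx_nonneg priorityOrderA (PySem.Dict.get? ⟨x⟩ "source")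
    have h2 := bucketIdx_le priorityOrderA (PySem.Dict.get? ⟨x⟩ "source")
    have hlen8 : (priorityOrderA.length : Int) = 8 := by decide
    unfold rankB
    omega
  have := foldl_insertBy_buckets (PySem.List.pyRange 0 9) hpair results hmem []
  simpa using this

-- ===== VERDICT (by name: the statement is the Claim_ definition above) =====
theorem remove_duplicates_and_rank_py_spec : Claim_equal_remove_duplicates_and_rank_py := by
  intro results _
  unfold Spec_remove_duplicates_and_rank_py remove_duplicates_and_rank_py remove_duplicates_and_rank_py_alt
  rw [sorted_eq_buckets results]
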